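-- pv_equiv track=rewrite | github.com/Xylobone/Battleships-game | battleships.py | ok_to_place_ship_at
-- ===== SOURCE A (Python) =====
-- def is_open_sea(row, column, fleet):
--     # Iterates through each ship in fleet
--     for i in range(len(fleet)):
--
--         # Creating variables to make it easier to code conditions
--         # 'ship' variables refer to the values of the ship being compared to user row and column values
--         shiplength = fleet[i][3]
--         shiphorizontal = fleet[i][2]
--         shiprow = fleet[i][0]
--         shipcolumn = fleet[i][1]
--
--         if shiphorizontal == True:
--             # Returns false if the row and column values are adjacent to the current ship
--             if (((row - 1) <= shiprow <= (row + 1)) and ((shipcolumn - 1) <= column <= (shipcolumn + shiplength + 1))):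
--                 return False
--
--         elif shiphorizontal == False:
--             # Returns false if the row and column values are adjacent to the current ship
--             if (((shiprow - 1) <= row <= (shiprow + shiplength + 1)) and ((column - 1) <= shipcolumn <= (column + 1))):
--                 return False
--
--         else:
--             # If it pases these conditions then the function will return that the square specified is in open sea.
--             return True
--
-- def ok_to_place_ship_at(row, column, horizontal, length, fleet):
--
--     # For loop to iterate through each ship in list (fleet)
--     for i in range(len(fleet)):
--         # if the ship is horizontal then we must check is_open_sea along column value (iterate through x axis)
--         if horizontal == True:
--             for j in range(0, length + 1):
--                 if is_open_sea(row, column + j, fleet) == False: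
--                     return False
--             return True
--
--         # if the ship is vertical then we must check is_open_sea along row value (iterate through y axis)
--         elif horizontal == False:
--             for k in range(0, length + 1):
--                 if is_open_sea(row + k, column, fleet) == False:
--                     return False
--             return True
--         else:
--             return True
-- ===== SOURCE B (Python) =====
-- def ok_to_place_ship_at(row, column, horizontal, length, fleet):
--     # Bounding-box formulation: one O(F) pass, no per-cell scanning.
--     if horizontal:
--         r_lo, r_hi, c_lo, c_hi = row, row, column, column + length
--     else:
--         r_lo, r_hi, c_lo, c_hi = row, row + length, column, column
--     for sr, sc, sh, sl in fleet:
--         if sh: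
--             z_r_lo, z_r_hi, z_c_lo, z_c_hi = sr - 1, sr + 1, sc - 1, sc + sl + 1
--         else:
--             z_r_lo, z_r_hi, z_c_lo, z_c_hi = sr - 1, sr + sl + 1, sc - 1, sc + 1
--         if max(r_lo, z_r_lo) <= min(r_hi, z_r_hi) and max(c_lo, z_c_lo) <= min(c_hi, z_c_hi):
--             return False
--     return True
-- ===== Notes on version B (the rewrite author's own statement) =====
-- stated objective: faster
-- what changed: Replaces the per-cell scan (for each of length+1 cells, re-scan the whole fleet for adjacency) with a single pass over the fleet testing overlap of the placement's bounding interval against each ship's expanded exclusion box.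
-- outside the precondition, e.g. on ok_to_place_ship_at(0, 0, True, 1, []): A returns None, B returns True
import Mathlib
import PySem

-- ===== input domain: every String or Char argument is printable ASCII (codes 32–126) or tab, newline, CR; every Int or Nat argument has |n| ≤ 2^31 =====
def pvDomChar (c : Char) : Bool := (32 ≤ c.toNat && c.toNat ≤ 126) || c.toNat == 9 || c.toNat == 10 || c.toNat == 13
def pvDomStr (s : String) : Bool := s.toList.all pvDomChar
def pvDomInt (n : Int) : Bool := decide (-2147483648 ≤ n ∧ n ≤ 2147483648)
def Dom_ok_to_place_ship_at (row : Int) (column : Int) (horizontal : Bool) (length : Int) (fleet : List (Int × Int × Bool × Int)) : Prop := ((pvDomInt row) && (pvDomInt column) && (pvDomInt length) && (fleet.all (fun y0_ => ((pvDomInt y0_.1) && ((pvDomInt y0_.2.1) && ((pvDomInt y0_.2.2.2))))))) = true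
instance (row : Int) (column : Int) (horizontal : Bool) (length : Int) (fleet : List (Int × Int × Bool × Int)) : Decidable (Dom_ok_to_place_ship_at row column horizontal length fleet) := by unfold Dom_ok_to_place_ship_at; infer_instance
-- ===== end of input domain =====

-- B replaces A's per-cell fleet rescans (O(length·F)) with one bounding-box overlap pass over the fleet (O(F)); equal return values on every nonempty fleet.

-- ===== PORT A =====
-- Python is_open_sea: loop over the ships in order (range(len(fleet)) with fleet[i],
-- transliterated as structural recursion over the same list in the same order);
-- returns False (some false) on the first adjacent ship, falls off the end returning None (none);
-- the `else: return True` branch is unreachable since shiphorizontal is a Bool.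
def is_open_sea (row : Int) (column : Int) : List (Int × Int × Bool × Int) → Option Bool
  | [] => none
  | (shiprow, shipcolumn, shiphorizontal, shiplength) :: rest =>
    if shiphorizontal = true then
      if (row - 1 ≤ shiprow ∧ shiprow ≤ row + 1) ∧
         (shipcolumn - 1 ≤ column ∧ column ≤ shipcolumn + shiplength + 1) then some false
      else is_open_sea row column rest
    else
      if (shiprow - 1 ≤ row ∧ row ≤ shiprow + shiplength + 1) ∧
         (column - 1 ≤ shipcolumn ∧ shipcolumn ≤ column + 1) then some false
      else is_open_sea row column rest

-- inner `for j in range(0, length + 1)` loop of the horizontal branch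
def okA_scanH (row : Int) (column : Int) (fleet : List (Int × Int × Bool × Int)) : List Int → Bool
  | [] => true
  | j :: js => if is_open_sea row (column + j) fleet = some false then false
               else okA_scanH row column fleet js

-- inner `for k in range(0, length + 1)` loop of the vertical branch
def okA_scanV (row : Int) (column : Int) (fleet : List (Int × Int × Bool × Int)) : List Int → Bool
  | [] => true
  | k :: ks => if is_open_sea (row + k) column fleet = some false then false
               else okA_scanV row column fleet ks

-- Python's outer `for i in range(len(fleet))` always returns during its first iteration
-- (horizontal is a Bool); on an empty fleet the loop never runs and Python returns None,
-- which is excluded by Pre_ (the `true` there is arbitrary).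
def ok_to_place_ship_at (row : Int) (column : Int) (horizontal : Bool) (length : Int) (fleet : List (Int × Int × Bool × Int)) : Bool :=
  if fleet.length = 0 then true
  else if horizontal = true then okA_scanH row column fleet (PySem.List.pyRange 0 (length + 1) 1)
  else okA_scanV row column fleet (PySem.List.pyRange 0 (length + 1) 1)

-- ===== PORT B =====
def okB_loop (rlo rhi clo chi : Int) : List (Int × Int × Bool × Int) → Bool
  | [] => true
  | (sr, sc, sh, sl) :: rest =>
    let z : Int × Int × Int × Int :=
      if sh = true then (sr - 1, sr + 1, sc - 1, sc + sl + 1)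
      else (sr - 1, sr + sl + 1, sc - 1, sc + 1)
    if max rlo z.1 ≤ min rhi z.2.1 ∧ max clo z.2.2.1 ≤ min chi z.2.2.2 then false
    else okB_loop rlo rhi clo chi rest

def ok_to_place_ship_at_alt (row : Int) (column : Int) (horizontal : Bool) (length : Int) (fleet : List (Int × Int × Bool × Int)) : Bool :=
  if horizontal = true then okB_loop row row column (column + length) fleet
  else okB_loop row (row + length) column column fleet

-- ===== PRECONDITION & SPEC =====
-- Pre_ excludes the empty fleet, on which Python A's outer loop never runs and A returns None
-- (not a bool); B naturally returns True there.
def Pre_ok_to_place_ship_at (row : Int) (column : Int) (horizontal : Bool) (length : Int) (fleet : List (Int × Int × Bool × Int)) : Prop := fleet ≠ []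
instance (row : Int) (column : Int) (horizontal : Bool) (length : Int) (fleet : List (Int × Int × Bool × Int)) : Decidable (Pre_ok_to_place_ship_at row column horizontal length fleet) := by unfold Pre_ok_to_place_ship_at; infer_instance

def pvWitness_ok_to_place_ship_at : Int × Int × Bool × Int × (List (Int × Int × Bool × Int)) := (0, 0, true, 1, [(5, 5, true, 2)])

def Spec_ok_to_place_ship_at (row : Int) (column : Int) (horizontal : Bool) (length : Int) (fleet : List (Int × Int × Bool × Int)) (out : Bool) : Prop := out = ok_to_place_ship_at_alt row column horizontal length fleet
instance (row : Int) (column : Int) (horizontal : Bool) (length : Int) (fleet : List (Int × Int × Bool × Int)) (out : Bool) : Decidable (Spec_ok_to_place_ship_at row column horizontal length fleet out) := by unfold Spec_ok_to_place_ship_at; infer_instance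

-- ===== CLAIM (what is proved, stated in full; the proofs are below) =====
def Claim_equal_ok_to_place_ship_at : Prop := ∀ (row : Int) (column : Int) (horizontal : Bool) (length : Int) (fleet : List (Int × Int × Bool × Int)), Dom_ok_to_place_ship_at row column horizontal length fleet → Pre_ok_to_place_ship_at row column horizontal length fleet → Spec_ok_to_place_ship_at row column horizontal length fleet (ok_to_place_ship_at row column horizontal length fleet)

-- ===== LEMMAS AND PROOFS =====

-- the per-point adjacency condition A tests
def pvAdj (r c : Int) (s : Int × Int × Bool × Int) : Prop :=
  if s.2.2.1 = true then
    (r - 1 ≤ s.1 ∧ s.1 ≤ r + 1) ∧ (s.2.1 - 1 ≤ c ∧ c ≤ s.2.1 + s.2.2.2 + 1)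
  else
    (s.1 - 1 ≤ r ∧ r ≤ s.1 + s.2.2.2 + 1) ∧ (c - 1 ≤ s.2.1 ∧ s.2.1 ≤ c + 1)

-- the per-ship box-overlap condition B tests
def pvBox (rlo rhi clo chi : Int) (s : Int × Int × Bool × Int) : Prop :=
  if s.2.2.1 = true then
    max rlo (s.1 - 1) ≤ min rhi (s.1 + 1) ∧ max clo (s.2.1 - 1) ≤ min chi (s.2.1 + s.2.2.2 + 1)
  else
    max rlo (s.1 - 1) ≤ min rhi (s.1 + s.2.2.2 + 1) ∧ max clo (s.2.1 - 1) ≤ min chi (s.2.1 + 1)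

theorem is_open_sea_cons_pos (row column : Int) (hd : Int × Int × Bool × Int) (tl : List (Int × Int × Bool × Int)) (h : pvAdj row column hd) :
    is_open_sea row column (hd :: tl) = some false := by
  obtain ⟨sr, sc, sh, sl⟩ := hd
  cases sh <;> simp_all [is_open_sea, pvAdj]

theorem is_open_sea_cons_neg (row column : Int) (hd : Int × Int × Bool × Int) (tl : List (Int × Int × Bool × Int)) (h : ¬ pvAdj row column hd) :
    is_open_sea row column (hd :: tl) = is_open_sea row column tl := by
  obtain ⟨sr, sc, sh, sl⟩ := hd
  cases sh <;> simp_all [is_open_sea, pvAdj]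

theorem is_open_sea_iff (row column : Int) (fleet : List (Int × Int × Bool × Int)) :
    is_open_sea row column fleet = some false ↔ ∃ s ∈ fleet, pvAdj row column s := by
  induction fleet with
  | nil => simp [is_open_sea]
  | cons hd tl ih =>
    by_cases h : pvAdj row column hd
    · rw [is_open_sea_cons_pos row column hd tl h]
      simp only [List.mem_cons]
      exact iff_of_true trivial ⟨hd, Or.inl rfl, h⟩
    · rw [is_open_sea_cons_neg row column hd tl h, ih]
      simp only [List.mem_cons]
      constructor
      · rintro ⟨s, hs, ha⟩; exact ⟨s, Or.inr hs, ha⟩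
      · rintro ⟨s, rfl | hs, ha⟩
        · exact absurd ha h
        · exact ⟨s, hs, ha⟩

theorem okA_scanH_iff (row column : Int) (fleet : List (Int × Int × Bool × Int)) (js : List Int) :
    okA_scanH row column fleet js = true ↔
      ∀ j ∈ js, ¬ is_open_sea row (column + j) fleet = some false := by
  induction js with
  | nil => simp [okA_scanH]
  | cons j js ih =>
    simp only [okA_scanH]
    split_ifs with h
    · simp only [false_iff]
      intro hall; exact hall j List.mem_cons_self h
    · rw [ih]; simp only [List.mem_cons]
      constructor
      · rintro hall a (rfl | ha)
        · exact h
        · exact hall a ha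
      · exact fun hall a ha => hall a (Or.inr ha)

theorem okA_scanV_iff (row column : Int) (fleet : List (Int × Int × Bool × Int)) (ks : List Int) :
    okA_scanV row column fleet ks = true ↔
      ∀ k ∈ ks, ¬ is_open_sea (row + k) column fleet = some false := by
  induction ks with
  | nil => simp [okA_scanV]
  | cons k ks ih =>
    simp only [okA_scanV]
    split_ifs with h
    · simp only [false_iff]
      intro hall; exact hall k List.mem_cons_self h
    · rw [ih]; simp only [List.mem_cons]
      constructor
      · rintro hall a (rfl | ha)
        · exact h
        · exact hall a ha
      · exact fun hall a ha => hall a (Or.inr ha)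

theorem okB_loop_cons_pos (rlo rhi clo chi : Int) (hd : Int × Int × Bool × Int) (tl : List (Int × Int × Bool × Int)) (h : pvBox rlo rhi clo chi hd) :
    okB_loop rlo rhi clo chi (hd :: tl) = false := by
  obtain ⟨sr, sc, sh, sl⟩ := hd
  cases sh <;> simp_all [okB_loop, pvBox]

theorem okB_loop_cons_neg (rlo rhi clo chi : Int) (hd : Int × Int × Bool × Int) (tl : List (Int × Int × Bool × Int)) (h : ¬ pvBox rlo rhi clo chi hd) :
    okB_loop rlo rhi clo chi (hd :: tl) = okB_loop rlo rhi clo chi tl := by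
  obtain ⟨sr, sc, sh, sl⟩ := hd
  cases sh <;> simp_all [okB_loop, pvBox] <;> intro _ <;> omega

theorem okB_loop_iff (rlo rhi clo chi : Int) (fleet : List (Int × Int × Bool × Int)) :
    okB_loop rlo rhi clo chi fleet = true ↔ ∀ s ∈ fleet, ¬ pvBox rlo rhi clo chi s := by
  induction fleet with
  | nil => simp [okB_loop]
  | cons hd tl ih =>
    by_cases h : pvBox rlo rhi clo chi hd
    · rw [okB_loop_cons_pos rlo rhi clo chi hd tl h]
      exact iff_of_false Bool.false_ne_true (fun hall => hall hd List.mem_cons_self h)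
    · rw [okB_loop_cons_neg rlo rhi clo chi hd tl h, ih]
      simp only [List.mem_cons]
      constructor
      · rintro hall s (rfl | hs)
        · exact h
        · exact hall s hs
      · exact fun hall s hs => hall s (Or.inr hs)

-- per-ship: some swept cell of a horizontal placement is adjacent ↔ boxes overlap
theorem sweepH_iff (row column length : Int) (s : Int × Int × Bool × Int) :
    (∃ j, (0 ≤ j ∧ j < length + 1) ∧ pvAdj row (column + j) s) ↔
      pvBox row row column (column + length) s := by
  obtain ⟨sr, sc, sh, sl⟩ := s
  cases sh <;> simp only [pvAdj, pvBox, Bool.false_eq_true, if_true, if_false] <;>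
    constructor
  · rintro ⟨j, h1, h2⟩; omega
  · intro h; exact ⟨max 0 (sc - 1 - column), by omega, by omega⟩
  · rintro ⟨j, h1, h2⟩; omega
  · intro h; exact ⟨max 0 (sc - 1 - column), by omega, by omega⟩

theorem sweepV_iff (row column length : Int) (s : Int × Int × Bool × Int) :
    (∃ k, (0 ≤ k ∧ k < length + 1) ∧ pvAdj (row + k) column s) ↔
      pvBox row (row + length) column column s := by
  obtain ⟨sr, sc, sh, sl⟩ := s
  cases sh <;> simp only [pvAdj, pvBox, Bool.false_eq_true, if_true, if_false] <;>
    constructor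
  · rintro ⟨k, h1, h2⟩; omega
  · intro h; exact ⟨max 0 (sr - 1 - row), by omega, by omega⟩
  · rintro ⟨k, h1, h2⟩; omega
  · intro h; exact ⟨max 0 (sr - 1 - row), by omega, by omega⟩

-- ===== VERDICT (by name: the statement is the Claim_ definition above) =====
theorem ok_to_place_ship_at_spec : Claim_equal_ok_to_place_ship_at := by
  intro row column horizontal length fleet _ hpre
  unfold Spec_ok_to_place_ship_at
  have hlen : ¬ fleet.length = 0 := by simpa using hpre
  apply Bool.eq_iff_iff.mpr
  cases horizontal with
  | true =>
    simp only [ok_to_place_ship_at, ok_to_place_ship_at_alt, if_neg hlen, reduceIte]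
    rw [okA_scanH_iff, okB_loop_iff]
    constructor
    · intro h s hs hbox
      rw [← sweepH_iff] at hbox
      obtain ⟨j, hj, hadj⟩ := hbox
      exact h j (by rw [PySem.List.mem_pyRange_one]; omega)
        ((is_open_sea_iff _ _ _).mpr ⟨s, hs, hadj⟩)
    · intro h j hj hfalse
      obtain ⟨s, hs, hadj⟩ := (is_open_sea_iff _ _ _).mp hfalse
      rw [PySem.List.mem_pyRange_one] at hj
      exact h s hs ((sweepH_iff row column length s).mp ⟨j, ⟨hj.1, hj.2⟩, hadj⟩)
  | false =>
    simp only [ok_to_place_ship_at, ok_to_place_ship_at_alt, if_neg hlen,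
      Bool.false_eq_true, reduceIte]
    rw [okA_scanV_iff, okB_loop_iff]
    constructor
    · intro h s hs hbox
      rw [← sweepV_iff] at hbox
      obtain ⟨k, hk, hadj⟩ := hbox
      exact h k (by rw [PySem.List.mem_pyRange_one]; omega)
        ((is_open_sea_iff _ _ _).mpr ⟨s, hs, hadj⟩)
    · intro h k hk hfalse
      obtain ⟨s, hs, hadj⟩ := (is_open_sea_iff _ _ _).mp hfalse
      rw [PySem.List.mem_pyRange_one] at hk
      exact h s hs ((sweepV_iff row column length s).mp ⟨k, ⟨hk.1, hk.2⟩, hadj⟩)
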